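-- pv_equiv track=rewrite | github.com/HimanshuKamadiya/code | list_all_quets/que_160.py | remove_first_n_even_numbers
-- ===== SOURCE A (Python) =====
-- def remove_first_n_even_numbers(lst, n):
--     count = 0
--     i = 0
--     while i < len(lst) and count < n:
--         if lst[i] % 2 == 0:
--             lst.pop(i)
--             count += 1
--         else:
--             i += 1
--     return lst
-- ===== SOURCE B (Python) =====
-- def remove_first_n_even_numbers(lst, n):
--     count = 0
--     kept = []
--     for x in lst:
--         if count < n and x % 2 == 0:
--             count += 1
--         else:
--             kept.append(x)
--     lst[:] = kept
--     return lst
-- ===== Notes on version B (the rewrite author's own statement) =====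
-- stated objective: faster
-- what changed: Replaces A's interleaved scan-and-pop while-loop (each pop shifts the tail, O(m^2) worst case) with a single keep-pass building the surviving elements and splicing them back in place, O(m).
import Mathlib
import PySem

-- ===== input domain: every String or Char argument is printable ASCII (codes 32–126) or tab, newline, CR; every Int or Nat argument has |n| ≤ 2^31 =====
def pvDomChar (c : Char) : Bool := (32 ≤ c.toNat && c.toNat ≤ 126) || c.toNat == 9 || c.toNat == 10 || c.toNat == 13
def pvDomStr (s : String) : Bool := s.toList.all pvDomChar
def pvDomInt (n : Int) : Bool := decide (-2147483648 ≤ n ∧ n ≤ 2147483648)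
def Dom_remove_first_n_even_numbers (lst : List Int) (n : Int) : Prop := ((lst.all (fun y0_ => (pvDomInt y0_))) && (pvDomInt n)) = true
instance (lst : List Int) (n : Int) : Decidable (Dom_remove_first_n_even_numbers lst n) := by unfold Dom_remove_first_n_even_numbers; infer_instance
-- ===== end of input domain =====

-- B replaces A's interleaved scan-and-pop loop with one keep-pass spliced back in place;
-- both mutate lst to the same final contents, and the equivalence proved is about the returned value.

-- ===== PORT A =====
-- A's while loop: state (lst, i, count); pop at i (List.eraseIdx) when even and count < n.
-- fuel only makes the loop total: each iteration decreases lst.length - i, so fuel = length + 1 is never exhausted.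
def removeLoopA (fuel : Nat) (lst : List Int) (i : Nat) (count : Int) (n : Int) : List Int :=
  match fuel with
  | 0 => lst
  | fuel + 1 =>
    if i < lst.length ∧ count < n then
      if PySem.Int.mod lst[i]! 2 = 0 then
        removeLoopA fuel (lst.eraseIdx i) i (count + 1) n
      else
        removeLoopA fuel lst (i + 1) count n
    else lst

def remove_first_n_even_numbers (lst : List Int) (n : Int) : List Int :=
  removeLoopA (lst.length + 1) lst 0 0 n

-- ===== PORT B =====
-- B's for loop over lst with state (count, kept); kept is returned (lst[:] = kept).
def keepLoopB (xs : List Int) (count : Int) (n : Int) : List Int :=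
  match xs with
  | [] => []
  | x :: rest =>
    if count < n ∧ PySem.Int.mod x 2 = 0 then
      keepLoopB rest (count + 1) n
    else
      x :: keepLoopB rest count n

def remove_first_n_even_numbers_alt (lst : List Int) (n : Int) : List Int :=
  keepLoopB lst 0 n

-- ===== PRECONDITION & SPEC =====
def Spec_remove_first_n_even_numbers (lst : List Int) (n : Int) (out : List Int) : Prop := out = remove_first_n_even_numbers_alt lst n
instance (lst : List Int) (n : Int) (out : List Int) : Decidable (Spec_remove_first_n_even_numbers lst n out) := by unfold Spec_remove_first_n_even_numbers; infer_instance

-- ===== CLAIM (what is proved, stated in full; the proofs are below) =====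
def Claim_equal_remove_first_n_even_numbers : Prop := ∀ (lst : List Int) (n : Int), Dom_remove_first_n_even_numbers lst n → Spec_remove_first_n_even_numbers lst n (remove_first_n_even_numbers lst n)

-- ===== LEMMAS AND PROOFS =====

-- eraseIdx leaves the prefix and shifts the suffix
theorem take_eraseIdx (lst : List Int) (i : Nat) :
    (lst.eraseIdx i).take i = lst.take i := by
  induction lst generalizing i with
  | nil => simp
  | cons x rest ih =>
    cases i with
    | zero => simp
    | succ j => simp [List.eraseIdx, ih]

theorem drop_eraseIdx (lst : List Int) (i : Nat) :
    (lst.eraseIdx i).drop i = lst.drop (i + 1) := by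
  induction lst generalizing i with
  | nil => simp
  | cons x rest ih =>
    cases i with
    | zero => simp
    | succ j => simp [List.eraseIdx, ih]

-- once count ≥ n, B's pass keeps everything
theorem keepLoopB_of_ge (xs : List Int) (count n : Int) (h : ¬ count < n) :
    keepLoopB xs count n = xs := by
  induction xs with
  | nil => rfl
  | cons x rest ih =>
    simp [keepLoopB, h, ih]

-- loop invariant: A's loop from index i leaves the prefix untouched and acts as B's pass on the suffix
theorem removeLoopA_eq (fuel : Nat) (lst : List Int) (i : Nat) (count n : Int)
    (hf : lst.length - i < fuel) :
    removeLoopA fuel lst i count n = lst.take i ++ keepLoopB (lst.drop i) count n := by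
  match fuel with
  | 0 => omega
  | fuel + 1 =>
  rw [removeLoopA]
  by_cases h : i < lst.length ∧ count < n
  · rw [if_pos h]
    have hget : lst[i]! = lst[i] := getElem!_pos lst i h.1
    by_cases he : PySem.Int.mod lst[i] 2 = 0
    · rw [hget, if_pos he,
        removeLoopA_eq fuel _ _ _ _ (by have := List.length_eraseIdx_of_lt h.1; omega)]
      have hd : lst.drop i = lst[i] :: lst.drop (i + 1) := List.drop_eq_getElem_cons h.1
      rw [hd, keepLoopB, if_pos ⟨h.2, he⟩]
      rw [take_eraseIdx, drop_eraseIdx]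
    · rw [hget, if_neg he, removeLoopA_eq fuel _ _ _ _ (by omega)]
      have hd : lst.drop i = lst[i] :: lst.drop (i + 1) := List.drop_eq_getElem_cons h.1
      rw [hd, keepLoopB, if_neg (by intro hc; exact he hc.2)]
      rw [← List.singleton_append, ← List.append_assoc]
      congr 1
      rw [List.take_add_one, List.getElem?_eq_getElem h.1]
      rfl
  · rw [if_neg h]
    rcases not_and_or.mp h with hi | hc
    · have : lst.length ≤ i := by omega
      simp [List.take_of_length_le this, List.drop_of_length_le this, keepLoopB]
    · rw [keepLoopB_of_ge _ _ _ hc, List.take_append_drop]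

-- ===== VERDICT (by name: the statement is the Claim_ definition above) =====
theorem remove_first_n_even_numbers_spec : Claim_equal_remove_first_n_even_numbers := by
  intro lst n _
  unfold Spec_remove_first_n_even_numbers remove_first_n_even_numbers remove_first_n_even_numbers_alt
  simpa using removeLoopA_eq (lst.length + 1) lst 0 0 n (by omega)
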